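-- pv_equiv track=rewrite | github.com/Egor53510/Pet-Projects | Algorithm Training 5.0 Lesson 2/The best ban.py | find_weakest_character
-- ===== SOURCE A (Python) =====
-- def find_weakest_character(n, m, strengths):
--     min_strength = float('inf')
--     min_i = 0
--     min_j = 0
--     for i in range(n):
--         for j in range(m):
--             if strengths[i][j] < min_strength:
--                 min_strength = strengths[i][j]
--                 min_i = i
--                 min_j = j
--     return min_i, min_j
-- ===== SOURCE B (Python) =====
-- def find_weakest_character(n, m, strengths):
--     # Flatten the grid into (value, i, j) cells in row-major order, then
--     # stable-sort by value: the head of the sorted list is the first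
--     # occurrence of the minimum (stability preserves row-major order on ties).
--     cells = [(strengths[i][j], i, j) for i in range(n) for j in range(m)]
--     ordered = sorted(cells, key=lambda c: c[0])
--     if not ordered:
--         return (0, 0)
--     _, i, j = ordered[0]
--     return (i, j)
-- ===== Notes on version B (the rewrite author's own statement) =====
-- stated objective: alternative
-- what changed: Replaces A's nested scan carrying a running (min,i,j) state with a sort-based strategy: flatten the grid into (value,i,j) cells and stable-sort them by value, returning the indices of the head of the sorted list (stability makes ties keep row-major order, i.e. the first occurrence).
import Mathlib
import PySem

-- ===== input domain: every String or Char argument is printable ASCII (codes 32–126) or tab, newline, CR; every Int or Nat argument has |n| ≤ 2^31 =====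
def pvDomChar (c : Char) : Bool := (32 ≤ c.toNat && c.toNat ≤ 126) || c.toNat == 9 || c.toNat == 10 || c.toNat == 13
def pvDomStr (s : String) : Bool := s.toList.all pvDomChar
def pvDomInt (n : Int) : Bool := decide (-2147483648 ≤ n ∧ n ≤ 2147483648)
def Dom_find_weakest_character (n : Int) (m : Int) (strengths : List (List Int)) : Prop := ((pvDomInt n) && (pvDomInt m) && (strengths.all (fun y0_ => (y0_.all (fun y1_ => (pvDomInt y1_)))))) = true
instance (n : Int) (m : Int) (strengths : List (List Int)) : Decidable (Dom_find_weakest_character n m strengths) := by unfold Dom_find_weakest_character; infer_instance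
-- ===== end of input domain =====

-- B replaces A's nested scan with a running (min, i, j) state by a sort-based strategy:
-- flatten the grid into (value, i, j) cells and stable-sort by value; the head of the
-- sorted list is the first occurrence of the minimum (objective: alternative).

-- ===== PORT A =====
-- inner loop body: 'if strengths[i][j] < min_strength: …' (min_strength = inf ports as none)
def pvInnerA (strengths : List (List Int)) (i : Int)
    (st : Option Int × Int × Int) (j : Int) : Option Int × Int × Int :=
  let v := PySem.List.pyGetD (PySem.List.pyGetD strengths i []) j 0
  match st with
  | (none, _, _) => (some v, i, j)
  | (some ms, mi, mj) => if v < ms then (some v, i, j) else (some ms, mi, mj)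

-- 'for j in range(m): …'
def pvOuterA (strengths : List (List Int)) (m : Int)
    (st : Option Int × Int × Int) (i : Int) : Option Int × Int × Int :=
  (PySem.List.pyRange 0 m 1).foldl (pvInnerA strengths i) st

def find_weakest_character (n : Int) (m : Int) (strengths : List (List Int)) : Int × Int :=
  let st := (PySem.List.pyRange 0 n 1).foldl (pvOuterA strengths m)
    ((none : Option Int), (0 : Int), (0 : Int))
  (st.2.1, st.2.2)

-- ===== PORT B =====
-- one cell of the comprehension: (strengths[i][j], i, j)
def pvCell (strengths : List (List Int)) (i : Int) (j : Int) : Int × Int × Int :=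
  (PySem.List.pyGetD (PySem.List.pyGetD strengths i []) j 0, i, j)

def find_weakest_character_alt (n : Int) (m : Int) (strengths : List (List Int)) : Int × Int :=
  let cells := (PySem.List.pyRange 0 n 1).flatMap (fun i =>
    (PySem.List.pyRange 0 m 1).map (fun j => pvCell strengths i j))
  let ordered := PySem.List.sorted cells (fun c => c.1) false
  match ordered with
  | [] => ((0 : Int), (0 : Int))
  | c :: _ => (c.2.1, c.2.2)

-- ===== PRECONDITION & SPEC =====
-- Pre_ excludes exactly the inputs on which Python A raises IndexError:
-- when both loops run (0 < n and 0 < m), the first n rows must exist and each must have length ≥ m.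
def Pre_find_weakest_character (n : Int) (m : Int) (strengths : List (List Int)) : Prop :=
  n ≤ 0 ∨ m ≤ 0 ∨ (n ≤ (strengths.length : Int) ∧
    ∀ row ∈ strengths.take n.toNat, m ≤ (row.length : Int))

instance (n : Int) (m : Int) (strengths : List (List Int)) :
    Decidable (Pre_find_weakest_character n m strengths) := by
  unfold Pre_find_weakest_character; infer_instance

def pvWitness_find_weakest_character : Int × Int × List (List Int) := (2, 2, [[3, 1], [2, 5]])

def Spec_find_weakest_character (n : Int) (m : Int) (strengths : List (List Int)) (out : Int × Int) : Prop := out = find_weakest_character_alt n m strengths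
instance (n : Int) (m : Int) (strengths : List (List Int)) (out : Int × Int) : Decidable (Spec_find_weakest_character n m strengths out) := by unfold Spec_find_weakest_character; infer_instance

-- ===== CLAIM (what is proved, stated in full; the proofs are below) =====
def Claim_equal_find_weakest_character : Prop := ∀ (n : Int) (m : Int) (strengths : List (List Int)), Dom_find_weakest_character n m strengths → Pre_find_weakest_character n m strengths → Spec_find_weakest_character n m strengths (find_weakest_character n m strengths)

-- ===== LEMMAS AND PROOFS =====

-- 'first strict minimum' step on optional cells
def pvStepH (b : Option (Int × Int × Int)) (c : Int × Int × Int) : Option (Int × Int × Int) :=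
  match b with
  | none => some c
  | some h => some (if c.1 < h.1 then c else h)

-- head of one stable-insertion step = pvStepH on the head
theorem pvInsertBy_head (x : Int × Int × Int) (acc : List (Int × Int × Int)) :
    (PySem.List.insertBy (fun a b => decide (a.1 < b.1)) x acc).head?
      = pvStepH acc.head? x := by
  cases acc with
  | nil => rfl
  | cons y ys =>
      simp only [PySem.List.insertBy, pvStepH, List.head?]
      split_ifs <;> simp_all

-- head of the whole insertion-sort fold = the first-strict-minimum fold
theorem pvSortFold_head (cells : List (Int × Int × Int)) :
    ∀ acc : List (Int × Int × Int),
    (cells.foldl (fun acc x => PySem.List.insertBy (fun a b => decide (a.1 < b.1)) x acc) acc).head?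
      = cells.foldl pvStepH acc.head? := by
  induction cells with
  | nil => intro acc; rfl
  | cons c cs ih =>
      intro acc
      simp only [List.foldl_cons]
      rw [ih, pvInsertBy_head]

-- interpret B's optional best as A's (min_strength, min_i, min_j) state
def pvConv : Option (Int × Int × Int) → Option Int × Int × Int
  | none => (none, 0, 0)
  | some c => (some c.1, c.2.1, c.2.2)

-- one step of A's loop, read through pvConv, is pvStepH
theorem pvStepA_conv (strengths : List (List Int)) (i : Int)
    (b : Option (Int × Int × Int)) (j : Int) :
    pvInnerA strengths i (pvConv b) j = pvConv (pvStepH b (pvCell strengths i j)) := by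
  rcases b with _ | ⟨v, bi, bj⟩
  · rfl
  · simp only [pvInnerA, pvStepH, pvConv, pvCell]
    split_ifs <;> rfl

-- A's inner loop over a row, through pvConv
theorem pvInner_conv (strengths : List (List Int)) (i : Int) (js : List Int) :
    ∀ b : Option (Int × Int × Int),
    js.foldl (pvInnerA strengths i) (pvConv b)
      = pvConv (js.foldl (fun b j => pvStepH b (pvCell strengths i j)) b) := by
  induction js with
  | nil => intro b; rfl
  | cons j js ih =>
      intro b
      simp only [List.foldl_cons]
      rw [pvStepA_conv]
      exact ih _

-- A's whole nested loop = the first-strict-minimum fold over the flattened cells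
theorem pvA_flat (n m : Int) (strengths : List (List Int)) :
    (PySem.List.pyRange 0 n 1).foldl (pvOuterA strengths m)
        ((none : Option Int), (0 : Int), (0 : Int))
      = pvConv (((PySem.List.pyRange 0 n 1).flatMap (fun i =>
          (PySem.List.pyRange 0 m 1).map (fun j => pvCell strengths i j))).foldl
            pvStepH none) := by
  rw [List.foldl_flatMap]
  simp only [List.foldl_map]
  have : ∀ (is : List Int) (b : Option (Int × Int × Int)),
      is.foldl (pvOuterA strengths m) (pvConv b)
        = pvConv (is.foldl (fun acc i =>
            (PySem.List.pyRange 0 m 1).foldl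
              (fun b j => pvStepH b (pvCell strengths i j)) acc) b) := by
    intro is
    induction is with
    | nil => intro b; rfl
    | cons i is ih =>
        intro b
        simp only [List.foldl_cons, pvOuterA]
        rw [pvInner_conv]
        exact ih _
  exact this (PySem.List.pyRange 0 n 1) none

theorem pvMain (n m : Int) (strengths : List (List Int)) :
    find_weakest_character n m strengths = find_weakest_character_alt n m strengths := by
  simp only [find_weakest_character, find_weakest_character_alt]
  rw [pvA_flat]
  set cells := (PySem.List.pyRange 0 n 1).flatMap (fun i =>
    (PySem.List.pyRange 0 m 1).map (fun j => pvCell strengths i j)) with hc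
  have hhead : (PySem.List.sorted cells (fun c => c.1) false).head?
      = cells.foldl pvStepH none := by
    rw [PySem.List.sorted_eq_foldl_insertBy]
    exact pvSortFold_head cells []
  cases hs : PySem.List.sorted cells (fun c => c.1) false with
  | nil =>
      rw [hs] at hhead
      simp only [List.head?] at hhead
      rw [← hhead]
      rfl
  | cons c t =>
      rw [hs] at hhead
      simp only [List.head?] at hhead
      rw [← hhead]
      rfl

-- ===== VERDICT (by name: the statement is the Claim_ definition above) =====
theorem find_weakest_character_spec : Claim_equal_find_weakest_character := by
  intro n m strengths _ _
  unfold Spec_find_weakest_character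
  exact pvMain n m strengths
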